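-- pv_equiv track=rewrite | github.com/aww/adventofcode | 2025/day08_playground.py | wirenearestn
-- ===== SOURCE A (Python) =====
-- Junction = tuple[int, int, int]
--
-- def wirenearestn(points: list[Junction], n) -> int:
--     # Values are (dist, i, j) where i,j are all indices into points (i<j)
--     # This will grow to d(d-1)/2 in length where d=len(points)
--     # One could possibly make this more efficient for large d by using
--     # a 3D space partioning tree.
--     distances: list[tuple[int, int, int]] = []
--     for i in range(len(points)):
--         for j in range(i + 1, len(points)):
--             distsq = 0
--             for k in range(3):
--                 distsq += (points[i][k] - points[j][k]) * (points[i][k] - points[j][k])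
--             distances.append((distsq, i, j))
--
--     # Sort by distance with closest first
--     distances.sort(key=lambda x: x[0])
--
--     # Combine the closest n pairs to form larger Circuits
--     # Start everything in it's own Circuit
--     circuitmembership: dict[int, list[int]] = {i: [i] for i in range(len(points))}
--     for _, i, j in distances[:n]:
--         if circuitmembership[i] is not circuitmembership[j]:
--             circuitmembership[i].extend(circuitmembership[j])
--             for k in circuitmembership[i]:
--                 circuitmembership[k] = circuitmembership[i]
--
--     # Empty the dictionary to make a list of unique circuits
--     uniquecircuits = []
--     while len(circuitmembership) > 0:
--         # Pick a random circuit that is still in circuitmembership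
--         nextcircuit = circuitmembership[next(iter(circuitmembership.keys()))]
--         uniquecircuits.append(nextcircuit)
--         for i in nextcircuit:
--             del circuitmembership[i]
--
--     # Sort the Circuits by size, largest first
--     uniquecircuits.sort(key=len, reverse=True)
--
--     # Report the product of the sizes of the three largest Circuits
--     sizeproduct = 1
--     for cir in uniquecircuits[:3]:
--         sizeproduct *= len(cir)
--     return sizeproduct
-- ===== SOURCE B (Python) =====
-- def wirenearestn(points, n):
--     # All (distsq, i, j) pairs for i < j, closest first.
--     pairs = []
--     for i in range(len(points)):
--         xa, ya, za = points[i]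
--         for j in range(i + 1, len(points)):
--             xb, yb, zb = points[j]
--             pairs.append(((xa - xb) * (xa - xb) + (ya - yb) * (ya - yb)
--                           + (za - zb) * (za - zb), i, j))
--     pairs.sort(key=lambda t: t[0])
--
--     # Flat label array instead of shared membership lists: merging rewrites
--     # one class's label; cluster sizes are read off by counting labels.
--     label = list(range(len(points)))
--     for _, i, j in pairs[:n]:
--         la, lb = label[i], label[j]
--         if la != lb:
--             label = [la if x == lb else x for x in label]
--
--     counts = {}
--     for l in label:
--         counts[l] = counts.get(l, 0) + 1
--     sizes = sorted(counts.values(), reverse=True)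
--     prod = 1
--     for s in sizes[:3]:
--         prod *= s
--     return prod
-- ===== Notes on version B (the rewrite author's own statement) =====
-- stated objective: alternative
-- what changed: Clusters are kept as a flat per-point label array that is relabelled on each merge and counted at the end, instead of A's dict of shared membership-list objects mutated via 'is'-identity and extend, emptied by a deletion loop and sorted by length; B also computes each squared distance directly instead of a coordinate loop.
import Mathlib
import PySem

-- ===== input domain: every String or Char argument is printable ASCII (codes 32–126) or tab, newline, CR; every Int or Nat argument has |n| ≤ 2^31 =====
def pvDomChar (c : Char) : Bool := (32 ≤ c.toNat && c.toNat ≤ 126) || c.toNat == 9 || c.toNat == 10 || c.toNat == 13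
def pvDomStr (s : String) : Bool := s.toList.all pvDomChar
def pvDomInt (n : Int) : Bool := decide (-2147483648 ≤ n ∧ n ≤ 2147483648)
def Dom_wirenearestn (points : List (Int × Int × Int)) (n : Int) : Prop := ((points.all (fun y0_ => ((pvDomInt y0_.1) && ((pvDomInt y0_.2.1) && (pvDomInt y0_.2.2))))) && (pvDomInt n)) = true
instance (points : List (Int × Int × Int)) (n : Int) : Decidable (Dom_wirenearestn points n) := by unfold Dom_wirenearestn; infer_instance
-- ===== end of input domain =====

-- B replaces A's shared cluster-membership lists + dict-emptying pass by a flat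
-- label array that is relabelled on merge and counted at the end (objective:
-- alternative; same asymptotic cost).

-- ===== PORT A =====
-- points[i][k] for k in range(3)
def pvComp (p : Int × Int × Int) (k : Int) : Int :=
  if k = 0 then p.1 else if k = 1 then p.2.1 else p.2.2

-- loop body of A's merging pass.  Python tests/updates shared list OBJECTS
-- ('is not', extend + rebinding); ported by value: the cluster lists are
-- pairwise distinct values, and the rebinding loop covers every key that
-- shares the mutated object, so value semantics coincide here.
def pvStepA (cm : PySem.Dict Int (List Int)) (t : Int × Int × Int) :
    PySem.Dict Int (List Int) :=
  if cm.getD t.2.1 [] ≠ cm.getD t.2.2 [] then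
    let merged := cm.getD t.2.1 [] ++ cm.getD t.2.2 []
    merged.foldl (fun dct k => dct.insert k merged) cm
  else cm

-- A's 'while len(circuitmembership) > 0' emptying loop; fuel = number of
-- entries, which bounds the number of iterations (each one deletes the
-- first key's whole circuit, which contains that key).
def pvExtractLoop : Nat → PySem.Dict Int (List Int) → List (List Int) → List (List Int)
  | 0, _, acc => acc
  | fuel + 1, cm, acc =>
    match cm.keys with
    | [] => acc
    | k :: _ =>
      let c := cm.getD k []
      pvExtractLoop fuel (c.foldl (fun d i => d.erase i) cm) (acc ++ [c])

def wirenearestn (points : List (Int × Int × Int)) (n : Int) : Int :=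
  let distances : List (Int × Int × Int) :=
    (PySem.List.pyRange 0 (PySem.List.len points) 1).foldl (fun acc i =>
      (PySem.List.pyRange (i + 1) (PySem.List.len points) 1).foldl (fun acc j =>
        let distsq :=
          (PySem.List.pyRange 0 3 1).foldl (fun s k =>
            s + (pvComp (PySem.List.pyGetD points i (0, 0, 0)) k
                  - pvComp (PySem.List.pyGetD points j (0, 0, 0)) k)
              * (pvComp (PySem.List.pyGetD points i (0, 0, 0)) k
                  - pvComp (PySem.List.pyGetD points j (0, 0, 0)) k)) 0
        acc ++ [(distsq, i, j)]) acc) []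
  let distances := PySem.List.sorted distances (fun x => x.1)
  let cm0 : PySem.Dict Int (List Int) :=
    (PySem.List.pyRange 0 (PySem.List.len points) 1).foldl
      (fun dct i => dct.insert i [i]) PySem.Dict.empty
  let cm := (PySem.List.slice distances none (some n)).foldl pvStepA cm0
  let uniq := pvExtractLoop cm.size cm []
  let uniq := PySem.List.sorted uniq (fun c => PySem.List.len c) true
  (PySem.List.slice uniq none (some 3)).foldl (fun p c => p * PySem.List.len c) 1

-- ===== PORT B =====
-- loop body of B's merging pass: rewrite every occurrence of label lb to la
def pvStepB (lab : List Int) (t : Int × Int × Int) : List Int :=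
  let la := PySem.List.pyGetD lab t.2.1 0
  let lb := PySem.List.pyGetD lab t.2.2 0
  if la ≠ lb then lab.map (fun x => if x = lb then la else x) else lab

def wirenearestn_alt (points : List (Int × Int × Int)) (n : Int) : Int :=
  let pairs : List (Int × Int × Int) :=
    (PySem.List.pyRange 0 (PySem.List.len points) 1).foldl (fun acc i =>
      let pa := PySem.List.pyGetD points i (0, 0, 0)
      (PySem.List.pyRange (i + 1) (PySem.List.len points) 1).foldl (fun acc j =>
        let pb := PySem.List.pyGetD points j (0, 0, 0)
        acc ++ [((pa.1 - pb.1) * (pa.1 - pb.1) + (pa.2.1 - pb.2.1) * (pa.2.1 - pb.2.1)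
                  + (pa.2.2 - pb.2.2) * (pa.2.2 - pb.2.2), i, j)]) acc) []
  let pairs := PySem.List.sorted pairs (fun t => t.1)
  let label := (PySem.List.slice pairs none (some n)).foldl pvStepB
      (PySem.List.pyRange 0 (PySem.List.len points) 1)
  let counts := label.foldl (fun dct l => dct.insert l (dct.getD l 0 + 1)) PySem.Dict.empty
  let sizes := PySem.List.sorted counts.values (fun x => x) true
  (PySem.List.slice sizes none (some 3)).foldl (fun p s => p * s) 1

-- ===== PRECONDITION & SPEC =====
def Spec_wirenearestn (points : List (Int × Int × Int)) (n : Int) (out : Int) : Prop := out = wirenearestn_alt points n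
instance (points : List (Int × Int × Int)) (n : Int) (out : Int) : Decidable (Spec_wirenearestn points n out) := by unfold Spec_wirenearestn; infer_instance

-- ===== CLAIM (what is proved, stated in full; the proofs are below) =====
def Claim_equal_wirenearestn : Prop := ∀ (points : List (Int × Int × Int)) (n : Int), Dom_wirenearestn points n → Spec_wirenearestn points n (wirenearestn points n)

-- ===== LEMMAS AND PROOFS =====

-- ---- small Dict facts the prelude does not provide (erase, constant-value insert loops) ----

theorem pv_get?_erase (d : PySem.Dict Int (List Int)) (k x : Int) :
    (d.erase k).get? x = if x = k then none else d.get? x := by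
  obtain ⟨items⟩ := d
  simp only [PySem.Dict.erase, PySem.Dict.get?]
  induction items with
  | nil => simp
  | cons p rest ih =>
    simp only [List.filter_cons]
    by_cases hpk : p.1 = k
    · rw [if_neg (by simp [hpk]), ih]
      by_cases hxk : x = k
      · simp [hxk]
      · rw [if_neg hxk, if_neg hxk, List.find?_cons_of_neg (by simp [hpk, Ne.symm hxk])]
    · rw [if_pos (by simp [hpk])]
      by_cases hpx : p.1 = x
      · rw [List.find?_cons_of_pos (by simp [hpx]), List.find?_cons_of_pos (by simp [hpx]),
          if_neg (by rintro rfl; exact hpk hpx)]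
      · rw [List.find?_cons_of_neg (by simp [hpx]), List.find?_cons_of_neg (by simp [hpx]), ih]

theorem pv_get?_foldl_erase (m : List Int) (cm : PySem.Dict Int (List Int)) (x : Int) :
    ((m.foldl (fun d i => d.erase i) cm).get? x) = if x ∈ m then none else cm.get? x := by
  induction m generalizing cm with
  | nil => simp
  | cons a m ih =>
    simp only [List.foldl_cons, ih, pv_get?_erase, List.mem_cons]
    by_cases h1 : x ∈ m <;> by_cases h2 : x = a <;> simp [h1, h2]

theorem pv_keys_erase (d : PySem.Dict Int (List Int)) (k : Int) :
    (d.erase k).keys = d.keys.filter (fun x => !(x == k)) := by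
  obtain ⟨items⟩ := d
  simp only [PySem.Dict.erase, PySem.Dict.keys, List.filter_map]
  rfl

theorem pv_keys_foldl_erase (m : List Int) (cm : PySem.Dict Int (List Int)) :
    (m.foldl (fun d i => d.erase i) cm).keys = cm.keys.filter (fun x => decide (x ∉ m)) := by
  induction m generalizing cm with
  | nil => simp
  | cons a m ih =>
    simp only [List.foldl_cons, ih, pv_keys_erase, List.filter_filter]
    apply List.filter_congr
    intro x _
    by_cases h1 : x ∈ m <;> by_cases h2 : x = a <;> simp [h1, h2]

theorem pv_getD_foldl_insert_const (m : List Int) (v : List Int)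
    (cm : PySem.Dict Int (List Int)) (x : Int) :
    ((m.foldl (fun dct k => dct.insert k v) cm).getD x []) =
      if x ∈ m then v else cm.getD x [] := by
  induction m generalizing cm with
  | nil => simp
  | cons a m ih =>
    simp only [List.foldl_cons, ih, PySem.Dict.getD_insert, List.mem_cons]
    by_cases h1 : x ∈ m <;> by_cases h2 : x = a <;> simp [h1, h2]

theorem pv_keys_foldl_insert_const (m : List Int) (v : List Int)
    (cm : PySem.Dict Int (List Int)) (hm : ∀ x ∈ m, x ∈ cm.keys) :
    ((m.foldl (fun dct k => dct.insert k v) cm)).keys = cm.keys := by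
  rw [PySem.Dict.keys_foldl_insert (f := fun _ _ => v), PySem.Set.update_eq_append_filter]
  have : (PySem.Set.ofList m).filter (fun y => !(PySem.Set.contains cm.keys y)) = [] := by
    rw [List.filter_eq_nil_iff]
    intro y hy
    have hym : y ∈ m := (PySem.Set.mem_ofList m y).1 hy
    simp
    exact hm y hym
  rw [this, List.append_nil]

-- ---- the merge invariant tying A's membership dict to B's label array ----

def pvInv (d : Nat) (cm : PySem.Dict Int (List Int)) (lab : List Int)
    (f : Int → List Int) : Prop :=
  lab.length = d ∧ cm.keys = PySem.List.pyRange 0 (d : Int) 1 ∧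
  (∀ k : Nat, k < d → cm.getD (k : Int) [] = f (lab.getD k 0)) ∧
  (∀ l ∈ lab, (f l).Nodup ∧
    ∀ x : Int, x ∈ f l ↔ ∃ k : Nat, k < d ∧ lab.getD k 0 = l ∧ x = (k : Int))

theorem pv_init_inv (d : Nat) :
    pvInv d ((PySem.List.pyRange 0 (d : Int) 1).foldl
        (fun dct i => dct.insert i [i]) PySem.Dict.empty)
      (PySem.List.pyRange 0 (d : Int) 1) (fun l => [l]) := by
  have hlen : (PySem.List.pyRange 0 (d : Int) 1).length = d := by
    simpa using PySem.List.length_pyRange_one 0 (d : Int)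
  have hitems : ((PySem.List.pyRange 0 (d : Int) 1).foldl
      (fun dct i => dct.insert i [i]) PySem.Dict.empty).items
      = (PySem.List.pyRange 0 (d : Int) 1).map (fun a => (a, [a])) := by
    have := PySem.Dict.items_foldl_insert_fresh (PySem.List.pyRange 0 (d : Int) 1)
      (fun a => a) (fun a => [a]) PySem.Dict.empty
      (by intro a _; simp [PySem.Dict.contains_empty])
      (by simpa using PySem.List.nodup_pyRange_one 0 (d : Int))
    simpa using this
  have hkeys : ((PySem.List.pyRange 0 (d : Int) 1).foldl
      (fun dct i => dct.insert i [i]) PySem.Dict.empty).keys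
      = PySem.List.pyRange 0 (d : Int) 1 := by
    simp [PySem.Dict.keys, hitems, Function.comp_def]
  have hknd : ((PySem.List.pyRange 0 (d : Int) 1).foldl
      (fun dct i => dct.insert i [i]) PySem.Dict.empty).keys.Nodup := by
    rw [hkeys]; exact PySem.List.nodup_pyRange_one 0 (d : Int)
  have hget : ∀ k : Nat, k < d → ((PySem.List.pyRange 0 (d : Int) 1).foldl
      (fun dct i => dct.insert i [i]) PySem.Dict.empty).getD (k : Int) [] = [(k : Int)] := by
    intro k hk
    apply PySem.Dict.getD_of_mem_items _ _ hknd
    rw [hitems]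
    exact List.mem_map_of_mem (by rw [PySem.List.mem_pyRange_one]; omega)
  have hgetlab : ∀ k : Nat, k < d → (PySem.List.pyRange 0 (d : Int) 1).getD k 0 = (k : Int) := by
    intro k hk
    rw [List.getD_eq_getElem _ _ (by omega : k < (PySem.List.pyRange 0 (d : Int) 1).length)]
    simpa using PySem.List.getElem_pyRange_one 0 (d : Int) k (by omega)
  refine ⟨hlen, hkeys, ?_, ?_⟩
  · intro k hk
    rw [hget k hk, hgetlab k hk]
  · intro l hl
    rw [PySem.List.mem_pyRange_one] at hl
    refine ⟨List.nodup_singleton l, ?_⟩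
    intro x
    simp only [List.mem_singleton]
    constructor
    · rintro rfl
      exact ⟨x.toNat, by omega, by rw [hgetlab x.toNat (by omega)]; omega, by omega⟩
    · rintro ⟨k, hk, hlab, rfl⟩
      rw [hgetlab k hk] at hlab
      omega

theorem pv_step_inv (d : Nat) (t : Int × Int × Int)
    (ht : 0 ≤ t.2.1 ∧ t.2.1 < (d : Int) ∧ 0 ≤ t.2.2 ∧ t.2.2 < (d : Int))
    (cm : PySem.Dict Int (List Int)) (lab : List Int) (f : Int → List Int)
    (h : pvInv d cm lab f) :
    ∃ f', pvInv d (pvStepA cm t) (pvStepB lab t) f' := by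
  obtain ⟨hlen, hkeys, hget, hspec⟩ := h
  obtain ⟨hi0, hid, hj0, hjd⟩ := ht
  have hkid : t.2.1.toNat < d := by omega
  have hkjd : t.2.2.toNat < d := by omega
  have hicast : ((t.2.1.toNat : Nat) : Int) = t.2.1 := by omega
  have hjcast : ((t.2.2.toNat : Nat) : Int) = t.2.2 := by omega
  set la := lab.getD t.2.1.toNat 0 with hla
  set lb := lab.getD t.2.2.toNat 0 with hlb
  have hla_mem : la ∈ lab := by
    rw [hla, List.getD_eq_getElem _ _ (by omega)]
    exact List.getElem_mem _
  have hlb_mem : lb ∈ lab := by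
    rw [hlb, List.getD_eq_getElem _ _ (by omega)]
    exact List.getElem_mem _
  have hgeti : cm.getD t.2.1 [] = f la := by rw [← hicast, hget _ hkid]
  have hgetj : cm.getD t.2.2 [] = f lb := by rw [← hjcast, hget _ hkjd]
  have hpyla : PySem.List.pyGetD lab t.2.1 0 = la := by
    rw [PySem.List.pyGetD_eq_getElem _ _ hi0 (by omega), hla,
      List.getD_eq_getElem _ _ (by omega)]
  have hpylb : PySem.List.pyGetD lab t.2.2 0 = lb := by
    rw [PySem.List.pyGetD_eq_getElem _ _ hj0 (by omega), hlb,
      List.getD_eq_getElem _ _ (by omega)]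
  have hmla := hspec la hla_mem
  have hmlb := hspec lb hlb_mem
  have hiff : f la = f lb → la = lb := by
    intro hf
    have hki_in : ((t.2.1.toNat : Nat) : Int) ∈ f la :=
      (hmla.2 _).2 ⟨t.2.1.toNat, hkid, rfl, rfl⟩
    rw [hf] at hki_in
    obtain ⟨k, hk, hkl, hkx⟩ := (hmlb.2 _).1 hki_in
    have : k = t.2.1.toNat := by omega
    rw [hla, ← hkl, this]
  by_cases hlalb : la = lb
  · refine ⟨f, ?_⟩
    have hA : pvStepA cm t = cm := by
      rw [pvStepA, if_neg]
      simp [hgeti, hgetj, hlalb]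
    have hB : pvStepB lab t = lab := by
      rw [pvStepB]
      simp [hpyla, hpylb, hlalb]
    rw [hA, hB]
    exact ⟨hlen, hkeys, hget, hspec⟩
  -- merging case
  have hfne : f la ≠ f lb := fun hf => hlalb (hiff hf)
  have hdisj : ∀ x : Int, x ∈ f la → x ∈ f lb → False := by
    intro x hxa hxb
    obtain ⟨k1, hk1, hl1, rfl⟩ := (hmla.2 _).1 hxa
    obtain ⟨k2, hk2, hl2, he⟩ := (hmlb.2 _).1 hxb
    have : k2 = k1 := by omega
    exact hlalb (by rw [← hl1, ← hl2, this])
  have hA : pvStepA cm t = (f la ++ f lb).foldl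
      (fun dct k => dct.insert k (f la ++ f lb)) cm := by
    rw [pvStepA, if_pos]
    · simp only [hgeti, hgetj]
    · simp [hgeti, hgetj, hfne]
  have hB : pvStepB lab t = lab.map (fun x => if x = lb then la else x) := by
    rw [pvStepB]
    simp [hpyla, hpylb, hlalb]
  rw [hA, hB]
  set g := fun x : Int => if x = lb then la else x with hg
  set lab' := lab.map g with hlab'
  set merged := f la ++ f lb with hmerged
  have hlab'len : lab'.length = d := by rw [hlab', List.length_map, hlen]
  have hlab'get : ∀ k : Nat, k < d → lab'.getD k 0 = g (lab.getD k 0) := by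
    intro k hk
    rw [hlab', List.getD_eq_getElem _ _ (by rw [List.length_map]; omega),
      List.getElem_map, List.getD_eq_getElem _ _ (by omega)]
  have hmem_merged : ∀ x : Int, x ∈ merged ↔
      ∃ k : Nat, k < d ∧ (lab.getD k 0 = la ∨ lab.getD k 0 = lb) ∧ x = (k : Int) := by
    intro x
    rw [hmerged, List.mem_append]
    constructor
    · rintro (hx | hx)
      · obtain ⟨k, hk, hl, rfl⟩ := (hmla.2 _).1 hx
        exact ⟨k, hk, Or.inl hl, rfl⟩
      · obtain ⟨k, hk, hl, rfl⟩ := (hmlb.2 _).1 hx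
        exact ⟨k, hk, Or.inr hl, rfl⟩
    · rintro ⟨k, hk, (hl | hl), rfl⟩
      · exact Or.inl ((hmla.2 _).2 ⟨k, hk, hl, rfl⟩)
      · exact Or.inr ((hmlb.2 _).2 ⟨k, hk, hl, rfl⟩)
  have hglab : ∀ k : Nat, k < d →
      (lab'.getD k 0 = la ↔ (lab.getD k 0 = la ∨ lab.getD k 0 = lb)) := by
    intro k hk
    rw [hlab'get k hk, hg]
    by_cases hc : lab.getD k 0 = lb <;> simp [hc] <;> tauto
  refine ⟨fun l => if l = la then merged else f l, hlab'len, ?_, ?_, ?_⟩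
  · rw [pv_keys_foldl_insert_const _ _ _ ?_, hkeys]
    intro x hx
    obtain ⟨k, hk, _, rfl⟩ := (hmem_merged x).1 hx
    rw [hkeys, PySem.List.mem_pyRange_one]
    omega
  · intro k hk
    rw [pv_getD_foldl_insert_const]
    beta_reduce
    by_cases hc : ((k : Nat) : Int) ∈ merged
    · rw [if_pos hc]
      obtain ⟨k', hk', hl', he⟩ := (hmem_merged _).1 hc
      have hkk : k' = k := by omega
      rw [if_pos ((hglab k hk).2 (by rw [← hkk]; exact hl'))]
    · rw [if_neg hc, hget k hk, if_neg]
      · congr 1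
        have hnla : ¬ lab.getD k 0 = la := fun hl =>
          hc ((hmem_merged _).2 ⟨k, hk, Or.inl hl, rfl⟩)
        have hnlb : ¬ lab.getD k 0 = lb := fun hl =>
          hc ((hmem_merged _).2 ⟨k, hk, Or.inr hl, rfl⟩)
        rw [hlab'get k hk, hg]
        exact (if_neg hnlb).symm
      · intro hl
        have := (hglab k hk).1 hl
        exact hc ((hmem_merged _).2 ⟨k, hk, this, rfl⟩)
  · intro l hl
    beta_reduce
    by_cases hcl : l = la
    · subst hcl
      rw [if_pos rfl]
      constructor
      · rw [hmerged]
        exact List.Nodup.append hmla.1 hmlb.1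
          (fun x hxa hxb => hdisj x hxa hxb)
      · intro x
        rw [hmem_merged x]
        constructor
        · rintro ⟨k, hk, hor, rfl⟩
          exact ⟨k, hk, (hglab k hk).2 hor, rfl⟩
        · rintro ⟨k, hk, hleq, rfl⟩
          exact ⟨k, hk, (hglab k hk).1 hleq, rfl⟩
    · rw [if_neg hcl]
      have hl_lab : l ∈ lab := by
        obtain ⟨x, hx, hgx⟩ := List.mem_map.1 (hlab' ▸ hl)
        rw [hg] at hgx
        by_cases hxlb : x = lb
        · exfalso; apply hcl; rw [← hgx]; simp [hxlb]
        · rw [← hgx]; simpa [hxlb] using hx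
      have hl_ne_lb : l ≠ lb := by
        intro hllb
        obtain ⟨x, hx, hgx⟩ := List.mem_map.1 (hlab' ▸ hl)
        rw [hg] at hgx
        by_cases hxlb : x = lb
        · exact hcl (by rw [← hgx]; simp [hxlb])
        · rw [← hgx] at hllb; simp [hxlb] at hllb
      have hsl := hspec l hl_lab
      refine ⟨hsl.1, ?_⟩
      intro x
      rw [hsl.2 x]
      constructor
      · rintro ⟨k, hk, hkl, rfl⟩
        refine ⟨k, hk, ?_, rfl⟩
        rw [hlab'get k hk, hg, hkl]
        exact if_neg hl_ne_lb
      · rintro ⟨k, hk, hkl, rfl⟩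
        refine ⟨k, hk, ?_, rfl⟩
        rw [hlab'get k hk, hg] at hkl
        beta_reduce at hkl
        by_cases hc : lab.getD k 0 = lb
        · rw [if_pos hc] at hkl
          exact absurd hkl.symm hcl
        · rw [if_neg hc] at hkl
          exact hkl

theorem pv_fold_inv (d : Nat) (sel : List (Int × Int × Int))
    (hb : ∀ t ∈ sel, 0 ≤ t.2.1 ∧ t.2.1 < (d : Int) ∧ 0 ≤ t.2.2 ∧ t.2.2 < (d : Int))
    (cm : PySem.Dict Int (List Int)) (lab : List Int) (f : Int → List Int)
    (h : pvInv d cm lab f) :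
    ∃ f', pvInv d (sel.foldl pvStepA cm) (sel.foldl pvStepB lab) f' := by
  induction sel generalizing cm lab f with
  | nil => exact ⟨f, h⟩
  | cons t sel ih =>
    obtain ⟨f', h'⟩ := pv_step_inv d t (hb t List.mem_cons_self) cm lab f h
    exact ih (fun u hu => hb u (List.mem_cons_of_mem _ hu)) _ _ f' h'

-- ---- the extraction loop returns exactly the circuits, in some order ----

theorem pv_extract_spec (fuel : Nat) (cm : PySem.Dict Int (List Int))
    (acc : List (List Int)) (ls : List Int) (f : Int → List Int)
    (hknd : cm.keys.Nodup) (hlnd : ls.Nodup)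
    (hkeys : ∀ x, x ∈ cm.keys ↔ ∃ l ∈ ls, x ∈ f l)
    (hcls : ∀ l ∈ ls, f l ≠ [] ∧ (∀ x ∈ f l, cm.getD x [] = f l))
    (hdis : ∀ l ∈ ls, ∀ l' ∈ ls, l ≠ l' → ∀ x ∈ f l, x ∉ f l')
    (hfuel : cm.keys.length ≤ fuel) :
    ∃ ls' : List Int, ls'.Perm ls ∧ pvExtractLoop fuel cm acc = acc ++ ls'.map f := by
  induction fuel generalizing cm acc ls with
  | zero =>
    have hknil : cm.keys = [] := List.eq_nil_of_length_eq_zero (by omega)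
    have hlnil : ls = [] := by
      rw [List.eq_nil_iff_forall_not_mem]
      intro l hl
      obtain ⟨x, hx⟩ := List.exists_mem_of_ne_nil _ ((hcls l hl).1)
      have : x ∈ cm.keys := (hkeys x).2 ⟨l, hl, hx⟩
      rw [hknil] at this
      exact (List.not_mem_nil).elim this
    exact ⟨[], by rw [hlnil], by simp [pvExtractLoop]⟩
  | succ fuel ih =>
    cases hk : cm.keys with
    | nil =>
      have hlnil : ls = [] := by
        rw [List.eq_nil_iff_forall_not_mem]
        intro l hl
        obtain ⟨x, hx⟩ := List.exists_mem_of_ne_nil _ ((hcls l hl).1)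
        have : x ∈ cm.keys := (hkeys x).2 ⟨l, hl, hx⟩
        rw [hk] at this
        exact (List.not_mem_nil).elim this
      refine ⟨[], by rw [hlnil], ?_⟩
      simp only [pvExtractLoop, hk]
      simp
    | cons k rest =>
      have hkmem : k ∈ cm.keys := by rw [hk]; exact List.mem_cons_self
      obtain ⟨l0, hl0, hkl0⟩ := (hkeys k).1 hkmem
      have hc : cm.getD k [] = f l0 := (hcls l0 hl0).2 k hkl0
      have hstep : pvExtractLoop (fuel + 1) cm acc
          = pvExtractLoop fuel ((cm.getD k []).foldl (fun d i => d.erase i) cm)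
              (acc ++ [cm.getD k []]) := by
        simp only [pvExtractLoop, hk]
      set cm' := ((cm.getD k []).foldl (fun d i => d.erase i) cm) with hcm'
      have hkeys'' : cm'.keys = cm.keys.filter (fun x => decide (x ∉ f l0)) := by
        rw [hcm', pv_keys_foldl_erase, hc]
      have hget' : ∀ x : Int, x ∉ f l0 → cm'.getD x [] = cm.getD x [] := by
        intro x hx
        rw [PySem.Dict.getD_eq_get?_getD, PySem.Dict.getD_eq_get?_getD, hcm',
          pv_get?_foldl_erase, hc, if_neg hx]
      have hmem' : ∀ x : Int, x ∈ cm'.keys ↔ x ∈ cm.keys ∧ x ∉ f l0 := by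
        intro x
        rw [hkeys'', List.mem_filter]
        simp
      have hknd' : cm'.keys.Nodup := by rw [hkeys'']; exact hknd.filter _
      have hlnd' : (ls.erase l0).Nodup := hlnd.erase l0
      have hl0ne : l0 ∉ ls.erase l0 := hlnd.not_mem_erase
      have hkeys' : ∀ x, x ∈ cm'.keys ↔ ∃ l ∈ ls.erase l0, x ∈ f l := by
        intro x
        rw [hmem' x]
        constructor
        · rintro ⟨hx, hnx⟩
          obtain ⟨l, hl, hxl⟩ := (hkeys x).1 hx
          have hne : l ≠ l0 := fun he => hnx (he ▸ hxl)
          exact ⟨l, (List.mem_erase_of_ne hne).2 hl, hxl⟩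
        · rintro ⟨l, hl, hxl⟩
          have hlin : l ∈ ls := List.mem_of_mem_erase hl
          have hne : l ≠ l0 := fun he => hl0ne (he ▸ hl)
          exact ⟨(hkeys x).2 ⟨l, hlin, hxl⟩, hdis l hlin l0 hl0 hne x hxl⟩
      have hcls' : ∀ l ∈ ls.erase l0, f l ≠ [] ∧ (∀ x ∈ f l, cm'.getD x [] = f l) := by
        intro l hl
        have hlin : l ∈ ls := List.mem_of_mem_erase hl
        have hne : l ≠ l0 := fun he => hl0ne (he ▸ hl)
        refine ⟨(hcls l hlin).1, ?_⟩
        intro x hxl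
        rw [hget' x (hdis l hlin l0 hl0 hne x hxl)]
        exact (hcls l hlin).2 x hxl
      have hdis' : ∀ l ∈ ls.erase l0, ∀ l' ∈ ls.erase l0, l ≠ l' → ∀ x ∈ f l, x ∉ f l' :=
        fun l hl l' hl' hne => hdis l (List.mem_of_mem_erase hl) l' (List.mem_of_mem_erase hl') hne
      have hfuel' : cm'.keys.length ≤ fuel := by
        have hlt : cm'.keys.length < cm.keys.length := by
          rw [hkeys'']
          exact List.length_filter_lt_length_iff_exists.2 ⟨k, hkmem, by simpa using hkl0⟩
        omega
      obtain ⟨ls'', hperm, heq⟩ := ih cm' (acc ++ [cm.getD k []]) (ls.erase l0)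
        hknd' hlnd' hkeys' hcls' hdis' hfuel'
      refine ⟨l0 :: ls'', ?_, ?_⟩
      · exact ((hperm.cons l0).trans (List.perm_cons_erase hl0).symm)
      · rw [hstep, heq, hc, List.map_cons, List.append_assoc, List.singleton_append]

-- ---- cluster sizes are label counts ----

theorem pv_count_positions (lab : List Int) (l : Int) :
    ((List.range lab.length).filter (fun k => lab.getD k 0 = l)).length = lab.count l := by
  induction lab with
  | nil => simp
  | cons a tl ih =>
    rw [List.length_cons, List.range_succ_eq_map, List.filter_cons, List.filter_map]
    have hcomp : ((fun k => decide (List.getD (a :: tl) k 0 = l)) ∘ Nat.succ)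
        = fun k => decide (tl.getD k 0 = l) := by
      funext k; simp [List.getD_cons_succ]
    rw [hcomp]
    by_cases ha : a = l
    · rw [if_pos (by simp [ha])]
      rw [List.length_cons, List.length_map, ih, List.count_cons]
      simp [ha]
    · rw [if_neg (by simp [ha])]
      rw [List.length_map, ih, List.count_cons]
      simp [ha]

theorem pv_class_size (d : Nat) (lab : List Int) (hlen : lab.length = d)
    (f : Int → List Int) (l : Int)
    (hnd : (f l).Nodup)
    (hmem : ∀ x : Int, x ∈ f l ↔ ∃ k : Nat, k < d ∧ lab.getD k 0 = l ∧ x = (k : Int)) :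
    ((f l).length : Int) = (lab.count l : Int) := by
  have hperm : (f l).Perm (List.map (fun k : Nat => (k : Int))
      ((List.range d).filter (fun k => lab.getD k 0 = l))) := by
    rw [List.perm_ext_iff_of_nodup hnd]
    · intro x
      rw [hmem]
      constructor
      · rintro ⟨k, hk, hl, rfl⟩
        refine List.mem_map.2 ⟨k, ?_, rfl⟩
        refine List.mem_filter.2 ⟨List.mem_range.2 hk, ?_⟩
        simpa using hl
      · intro hx
        obtain ⟨k, hkf, hxk⟩ := List.mem_map.1 hx
        obtain ⟨hkr, hl⟩ := List.mem_filter.1 hkf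
        exact ⟨k, List.mem_range.1 hkr, by simpa using hl, hxk.symm⟩
    · exact List.Nodup.map (fun a b h => by exact_mod_cast h)
        ((List.nodup_range (n := d)).filter _)
  rw [hperm.length_eq, List.length_map, ← hlen, pv_count_positions]

-- ---- descending sorts of equal multisets coincide ----

theorem pv_sorted_desc_of_perm (xs ys : List Int) (h : xs.Perm ys) :
    PySem.List.sorted xs (fun x => x) true = PySem.List.sorted ys (fun x => x) true := by
  apply List.eq_of_perm_of_sorted (le := fun a b : Int => b ≤ a)
  · intro a b _ _ h1 h2; omega
  · exact PySem.List.sorted_pairwise_rev xs (fun x => x)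
  · exact PySem.List.sorted_pairwise_rev ys (fun x => x)
  · exact (PySem.List.sorted_perm xs _ _).trans (h.trans (PySem.List.sorted_perm ys _ _).symm)

theorem pv_map_len_sorted (uniq : List (List Int)) :
    (PySem.List.sorted uniq (fun c => PySem.List.len c) true).map (fun c => PySem.List.len c)
      = PySem.List.sorted (uniq.map (fun c => PySem.List.len c)) (fun x => x) true := by
  apply List.eq_of_perm_of_sorted (le := fun a b : Int => b ≤ a)
  · intro a b _ _ h1 h2; omega
  · exact List.Pairwise.map _ (fun a b hab => hab)
      (PySem.List.sorted_pairwise_rev uniq (fun c => PySem.List.len c))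
  · exact PySem.List.sorted_pairwise_rev _ (fun x => x)
  · exact ((PySem.List.sorted_perm uniq _ _).map _).trans
      (PySem.List.sorted_perm _ _ _).symm

-- ---- the two generation passes build the same pair list ----

theorem pv_range3 : PySem.List.pyRange 0 3 1 = [0, 1, 2] := by decide

theorem pv_distsq_eq (pa pb : Int × Int × Int) :
    (PySem.List.pyRange 0 3 1).foldl (fun s k =>
        s + (pvComp pa k - pvComp pb k) * (pvComp pa k - pvComp pb k)) 0
    = (pa.1 - pb.1) * (pa.1 - pb.1) + (pa.2.1 - pb.2.1) * (pa.2.1 - pb.2.1)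
        + (pa.2.2 - pb.2.2) * (pa.2.2 - pb.2.2) := by
  rw [pv_range3]
  simp only [List.foldl_cons, List.foldl_nil, pvComp]
  norm_num

theorem pv_gen_eq (points : List (Int × Int × Int)) :
    ((PySem.List.pyRange 0 (PySem.List.len points) 1).foldl (fun acc i =>
      (PySem.List.pyRange (i + 1) (PySem.List.len points) 1).foldl (fun acc j =>
        acc ++ [((PySem.List.pyRange 0 3 1).foldl (fun s k =>
            s + (pvComp (PySem.List.pyGetD points i (0, 0, 0)) k
                  - pvComp (PySem.List.pyGetD points j (0, 0, 0)) k)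
              * (pvComp (PySem.List.pyGetD points i (0, 0, 0)) k
                  - pvComp (PySem.List.pyGetD points j (0, 0, 0)) k)) 0, i, j)]) acc) []
      : List (Int × Int × Int))
    = (PySem.List.pyRange 0 (PySem.List.len points) 1).foldl (fun acc i =>
      (PySem.List.pyRange (i + 1) (PySem.List.len points) 1).foldl (fun acc j =>
        acc ++ [(((PySem.List.pyGetD points i (0, 0, 0)).1 - (PySem.List.pyGetD points j (0, 0, 0)).1)
                    * ((PySem.List.pyGetD points i (0, 0, 0)).1 - (PySem.List.pyGetD points j (0, 0, 0)).1)
                  + ((PySem.List.pyGetD points i (0, 0, 0)).2.1 - (PySem.List.pyGetD points j (0, 0, 0)).2.1)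
                    * ((PySem.List.pyGetD points i (0, 0, 0)).2.1 - (PySem.List.pyGetD points j (0, 0, 0)).2.1)
                  + ((PySem.List.pyGetD points i (0, 0, 0)).2.2 - (PySem.List.pyGetD points j (0, 0, 0)).2.2)
                    * ((PySem.List.pyGetD points i (0, 0, 0)).2.2 - (PySem.List.pyGetD points j (0, 0, 0)).2.2),
                 i, j)]) acc) [] := by
  apply List.foldl_ext
  intro acc i _
  apply List.foldl_ext
  intro acc' j _
  rw [pv_distsq_eq]

theorem pv_gen_bounds (d : Nat) (points : List (Int × Int × Int)) (hd : points.length = d)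
    (t : Int × Int × Int)
    (ht : t ∈ ((PySem.List.pyRange 0 (PySem.List.len points) 1).foldl (fun acc i =>
      (PySem.List.pyRange (i + 1) (PySem.List.len points) 1).foldl (fun acc j =>
        acc ++ [(((PySem.List.pyGetD points i (0, 0, 0)).1 - (PySem.List.pyGetD points j (0, 0, 0)).1)
                    * ((PySem.List.pyGetD points i (0, 0, 0)).1 - (PySem.List.pyGetD points j (0, 0, 0)).1)
                  + ((PySem.List.pyGetD points i (0, 0, 0)).2.1 - (PySem.List.pyGetD points j (0, 0, 0)).2.1)
                    * ((PySem.List.pyGetD points i (0, 0, 0)).2.1 - (PySem.List.pyGetD points j (0, 0, 0)).2.1)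
                  + ((PySem.List.pyGetD points i (0, 0, 0)).2.2 - (PySem.List.pyGetD points j (0, 0, 0)).2.2)
                    * ((PySem.List.pyGetD points i (0, 0, 0)).2.2 - (PySem.List.pyGetD points j (0, 0, 0)).2.2),
                 i, j)]) acc) [])) :
    0 ≤ t.2.1 ∧ t.2.1 < (d : Int) ∧ 0 ≤ t.2.2 ∧ t.2.2 < (d : Int) := by
  simp only [PySem.List.foldl_append_singleton_eq_map, PySem.List.foldl_append_eq_flatMap,
    List.nil_append] at ht
  rw [List.mem_flatMap] at ht
  obtain ⟨i, hi, hti⟩ := ht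
  rw [List.mem_map] at hti
  obtain ⟨j, hj, rfl⟩ := hti
  rw [PySem.List.mem_pyRange_one] at hi hj
  rw [PySem.List.len_eq, hd] at hi hj
  refine ⟨by simpa using hi.1, by simpa using hi.2, by simp; omega, by simpa using hj.2⟩

-- ---- the core: from the same selected pair list, both halves agree ----

theorem pv_core (d : Nat) (sel : List (Int × Int × Int))
    (hb : ∀ t ∈ sel, 0 ≤ t.2.1 ∧ t.2.1 < (d : Int) ∧ 0 ≤ t.2.2 ∧ t.2.2 < (d : Int)) :
    (PySem.List.slice (PySem.List.sorted
        (pvExtractLoop (sel.foldl pvStepA ((PySem.List.pyRange 0 (d : Int) 1).foldl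
            (fun dct i => dct.insert i [i]) PySem.Dict.empty)).size
          (sel.foldl pvStepA ((PySem.List.pyRange 0 (d : Int) 1).foldl
            (fun dct i => dct.insert i [i]) PySem.Dict.empty)) [])
        (fun c => PySem.List.len c) true) none (some 3)).foldl
      (fun p c => p * PySem.List.len c) 1
    =
    (PySem.List.slice (PySem.List.sorted
        ((sel.foldl pvStepB (PySem.List.pyRange 0 (d : Int) 1)).foldl
          (fun dct l => dct.insert l (dct.getD l 0 + 1)) PySem.Dict.empty).values
        (fun x => x) true) none (some 3)).foldl (fun p s => p * s) 1 := by
  obtain ⟨f, hinv⟩ := pv_fold_inv d sel hb _ _ _ (pv_init_inv d)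
  set cm := sel.foldl pvStepA ((PySem.List.pyRange 0 (d : Int) 1).foldl
      (fun dct i => dct.insert i [i]) PySem.Dict.empty) with hcm
  set lab := sel.foldl pvStepB (PySem.List.pyRange 0 (d : Int) 1) with hlab
  obtain ⟨hlen, hkeys, hget, hspec⟩ := hinv
  have hlabget : ∀ k : Nat, k < d → lab.getD k 0 ∈ lab := by
    intro k hk
    rw [List.getD_eq_getElem _ _ (by omega)]
    exact List.getElem_mem _
  -- extraction
  have hknd : cm.keys.Nodup := by rw [hkeys]; exact PySem.List.nodup_pyRange_one 0 (d : Int)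
  have hkeys' : ∀ x, x ∈ cm.keys ↔ ∃ l ∈ PySem.Set.ofList lab, x ∈ f l := by
    intro x
    rw [hkeys, PySem.List.mem_pyRange_one]
    constructor
    · intro hx
      have hkd : x.toNat < d := by omega
      refine ⟨lab.getD x.toNat 0, (PySem.Set.mem_ofList _ _).2 (hlabget _ hkd), ?_⟩
      exact ((hspec _ (hlabget _ hkd)).2 x).2 ⟨x.toNat, hkd, rfl, by omega⟩
    · rintro ⟨l, hl, hxl⟩
      obtain ⟨k, hk, _, rfl⟩ := ((hspec l ((PySem.Set.mem_ofList _ _).1 hl)).2 x).1 hxl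
      omega
  have hcls : ∀ l ∈ PySem.Set.ofList lab, f l ≠ [] ∧ (∀ x ∈ f l, cm.getD x [] = f l) := by
    intro l hl
    have hllab : l ∈ lab := (PySem.Set.mem_ofList _ _).1 hl
    obtain ⟨k0, hk0, hlk0⟩ := List.mem_iff_getElem.1 hllab
    constructor
    · apply List.ne_nil_of_mem (a := ((k0 : Nat) : Int))
      exact ((hspec l hllab).2 _).2 ⟨k0, by omega, by
        rw [List.getD_eq_getElem _ _ (by omega)]; exact hlk0, rfl⟩
    · intro x hxl
      obtain ⟨k, hk, hlk, rfl⟩ := ((hspec l hllab).2 x).1 hxl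
      rw [hget k hk, hlk]
  have hdis : ∀ l ∈ PySem.Set.ofList lab, ∀ l' ∈ PySem.Set.ofList lab, l ≠ l' →
      ∀ x ∈ f l, x ∉ f l' := by
    intro l hl l' hl' hne x hxl hxl'
    obtain ⟨k1, hk1, hlk1, rfl⟩ := ((hspec l ((PySem.Set.mem_ofList _ _).1 hl)).2 x).1 hxl
    obtain ⟨k2, hk2, hlk2, he⟩ := ((hspec l' ((PySem.Set.mem_ofList _ _).1 hl')).2 _).1 hxl'
    have : k2 = k1 := by omega
    exact hne (by rw [← hlk1, ← hlk2, this])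
  have hsize : cm.keys.length ≤ cm.size := by
    simp [PySem.Dict.keys, PySem.Dict.size]
  obtain ⟨ls', hperm, hext⟩ := pv_extract_spec cm.size cm [] (PySem.Set.ofList lab) f
    hknd (PySem.Set.nodup_ofList lab) hkeys' hcls hdis hsize
  rw [hext, List.nil_append]
  -- B side counts
  rw [PySem.Dict.foldl_insert_getD_add_one_eq_counter]
  have hvals : (PySem.Dict.counter lab).values
      = (PySem.Set.ofList lab).map (fun l => ((lab.count l : Nat) : Int)) := by
    show ((PySem.Dict.counter lab).items).map (fun p => p.2) = _
    rw [PySem.Dict.items_counter, List.map_map]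
    rfl
  rw [hvals]
  -- A side: product over lengths
  have hslice3 : ∀ xs : List Int, PySem.List.slice xs none (some 3) = xs.take 3 := by
    intro xs
    have := PySem.List.slice_to_natCast xs 3
    norm_num at this
    exact this
  have hslice3' : ∀ xs : List (List Int), PySem.List.slice xs none (some 3) = xs.take 3 := by
    intro xs
    have := PySem.List.slice_to_natCast xs 3
    norm_num at this
    exact this
  rw [hslice3, hslice3']
  have step1 : ∀ L : List (List Int),
      L.foldl (fun p c => p * PySem.List.len c) 1
        = (L.map (fun c => PySem.List.len c)).foldl (fun p s => p * s) 1 := by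
    intro L
    rw [List.foldl_map]
  rw [step1]
  rw [List.map_take, pv_map_len_sorted (ls'.map f), List.map_map]
  have step6 : (PySem.Set.ofList lab).map ((fun c => PySem.List.len c) ∘ f)
      = (PySem.Set.ofList lab).map (fun l => ((lab.count l : Nat) : Int)) := by
    apply List.map_congr_left
    intro l hl
    have hllab : l ∈ lab := (PySem.Set.mem_ofList _ _).1 hl
    show PySem.List.len (f l) = _
    rw [PySem.List.len_eq]
    exact pv_class_size d lab hlen f l (hspec l hllab).1 ((hspec l hllab).2)
  have hsorteq : PySem.List.sorted (ls'.map ((fun c => PySem.List.len c) ∘ f)) (fun x => x) true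
      = PySem.List.sorted ((PySem.Set.ofList lab).map (fun l => ((lab.count l : Nat) : Int)))
          (fun x => x) true := by
    rw [← step6]
    exact pv_sorted_desc_of_perm _ _ (hperm.map _)
  rw [hsorteq]

theorem pv_main_eq (points : List (Int × Int × Int)) (n : Int) :
    wirenearestn points n = wirenearestn_alt points n := by
  unfold wirenearestn wirenearestn_alt
  rw [pv_gen_eq points, PySem.List.len_eq points]
  apply pv_core points.length
  intro t ht
  exact pv_gen_bounds points.length points rfl t
    (by
      have h1 := PySem.List.mem_of_mem_slice _ _ _ ht
      rw [PySem.List.mem_sorted] at h1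
      rw [PySem.List.len_eq points]
      exact h1)

-- ===== VERDICT (by name: the statement is the Claim_ definition above) =====
theorem wirenearestn_spec : Claim_equal_wirenearestn := by
  unfold Claim_equal_wirenearestn Spec_wirenearestn
  intro points n _
  exact pv_main_eq points n
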